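-- pv_equiv track=rewrite | github.com/AppleYoujatea/OriginalApplePie | 2nd_quarter/week05/Jose/모의고사.py | solution
-- ===== SOURCE A (Python) =====
-- def solution(answers):
--     answer = []
--     score = [0, 0, 0]
--     a = [1,2,3,4,5] # 5
--     b = [2,1,2,3,2,4,2,5] # 8
--     c = [3,3,1,1,2,2,4,4,5,5] #10
--
--     for i in range(len(answers)):
--         if (answers[i] == a[i%5]):
--             score[0] += 1
--         if (answers[i] == b[i%8]):
--             score[1] += 1
--         if (answers[i] == c[i%10]):
--             score[2] += 1
--
--     mx = max(score)
--
--     for idx, i in enumerate(score):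
--         if i == mx:
--             answer.append(idx + 1 )
--
--
--     return answer
-- ===== SOURCE B (Python) =====
-- def solution(answers):
--     patterns = [[1, 2, 3, 4, 5],
--                 [2, 1, 2, 3, 2, 4, 2, 5],
--                 [3, 3, 1, 1, 2, 2, 4, 4, 5, 5]]
--     # Histogram pass: bucket each answer by (position mod 40, value); 40 = lcm of
--     # the pattern periods, so a bucket fully determines what each pattern predicts.
--     cnt = {}
--     for i, q in enumerate(answers):
--         key = (i % 40, q)
--         cnt[key] = cnt.get(key, 0) + 1
--     # Each score is 40 table lookups, no per-element comparisons.
--     score = [sum(cnt.get((r, pat[r % len(pat)]), 0) for r in range(40))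
--              for pat in patterns]
--     best = max(score)
--     return [k + 1 for k, s in enumerate(score) if s == best]
-- ===== Notes on version B (the rewrite author's own statement) =====
-- stated objective: alternative
-- what changed: Replaces A's per-element comparison loop against three modulo-indexed patterns by a histogram: one pass buckets answers by (index mod 40, value) into a dict (40 = lcm of the pattern periods), then each score is read off as 40 dictionary lookups at the pattern's predicted values, with no per-element comparisons.
import Mathlib
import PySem

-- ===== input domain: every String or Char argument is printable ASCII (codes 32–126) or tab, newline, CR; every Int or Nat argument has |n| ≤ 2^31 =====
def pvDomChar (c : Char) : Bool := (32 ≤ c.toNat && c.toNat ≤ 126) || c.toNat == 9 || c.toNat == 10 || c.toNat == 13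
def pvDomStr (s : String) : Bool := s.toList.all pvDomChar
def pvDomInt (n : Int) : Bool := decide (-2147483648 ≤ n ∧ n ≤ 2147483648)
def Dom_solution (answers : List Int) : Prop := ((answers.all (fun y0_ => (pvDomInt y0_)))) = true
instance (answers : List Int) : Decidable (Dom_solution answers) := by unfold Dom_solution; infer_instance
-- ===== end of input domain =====

-- B replaces A's per-element comparison loop against three modulo-indexed
-- patterns by a histogram keyed on (index mod 40, value), from which each
-- score is read off as 40 dictionary lookups; objective: alternative, same cost.

-- ===== PORT A =====
-- A's `for i in range(len(answers))` walks answers once, carrying the index i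
-- and updating the three counters; answers[i] is the element walked over.
def solLoopA : List Int → Nat → Int × Int × Int → Int × Int × Int
  | [], _, s => s
  | x :: xs, i, (s0, s1, s2) =>
      solLoopA xs (i + 1)
        (s0 + (if x = ([1,2,3,4,5] : List Int).getD (i % 5) 0 then 1 else 0),
         s1 + (if x = ([2,1,2,3,2,4,2,5] : List Int).getD (i % 8) 0 then 1 else 0),
         s2 + (if x = ([3,3,1,1,2,2,4,4,5,5] : List Int).getD (i % 10) 0 then 1 else 0))

def solution (answers : List Int) : List Int :=
  let s := solLoopA answers 0 (0, 0, 0)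
  let score : List Int := [s.1, s.2.1, s.2.2]
  let mx := (PySem.List.max? score (fun x => x)).getD 0
  (PySem.List.enumerate score).foldl
    (fun answer p => if p.2 = mx then answer ++ [p.1 + 1] else answer) []

-- ===== PORT B =====
-- `for i, q in enumerate(answers): cnt[key] = cnt.get(key, 0) + 1`, then each
-- score is a sum of 40 dict lookups `cnt.get((r, pat[r % len(pat)]), 0)`.
def solution_alt (answers : List Int) : List Int :=
  let patterns : List (List Int) :=
    [[1,2,3,4,5], [2,1,2,3,2,4,2,5], [3,3,1,1,2,2,4,4,5,5]]
  let cnt : PySem.Dict (Int × Int) Int :=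
    (PySem.List.enumerate answers).foldl
      (fun d p =>
        d.insert (PySem.Int.mod p.1 40, p.2) (d.getD (PySem.Int.mod p.1 40, p.2) 0 + 1))
      PySem.Dict.empty
  let score : List Int :=
    patterns.map (fun pat =>
      ((PySem.List.pyRange 0 40 1).map
        (fun r => cnt.getD (r, PySem.List.pyGetD pat (PySem.Int.mod r (pat.length : Int)) 0) 0)).sum)
  let best := (PySem.List.max? score (fun x => x)).getD 0
  (PySem.List.enumerate score).filterMap
    (fun p => if p.2 = best then some (p.1 + 1) else none)

-- ===== PRECONDITION & SPEC =====
def Spec_solution (answers : List Int) (out : List Int) : Prop := out = solution_alt answers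
instance (answers : List Int) (out : List Int) : Decidable (Spec_solution answers out) := by unfold Spec_solution; infer_instance

-- ===== CLAIM (what is proved, stated in full; the proofs are below) =====
def Claim_equal_solution : Prop := ∀ (answers : List Int), Dom_solution answers → Spec_solution answers (solution answers)

-- ===== LEMMAS AND PROOFS =====

-- A's per-pattern direct score starting at index n
def aScore (pat : List Int) : List Int → Nat → Int
  | [], _ => 0
  | x :: xs, n => (if x = pat.getD (n % pat.length) 0 then 1 else 0) + aScore pat xs (n + 1)

lemma solLoopA_eq_aScore (ans : List Int) : ∀ (n : Nat) (s0 s1 s2 : Int),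
    solLoopA ans n (s0, s1, s2) =
      (s0 + aScore [1,2,3,4,5] ans n,
       s1 + aScore [2,1,2,3,2,4,2,5] ans n,
       s2 + aScore [3,3,1,1,2,2,4,4,5,5] ans n) := by
  induction ans with
  | nil => intro n s0 s1 s2; simp [solLoopA, aScore]
  | cons x xs ih =>
      intro n s0 s1 s2
      rw [solLoopA, ih, aScore, aScore, aScore]
      simp only [List.length_cons, List.length_nil]
      ring_nf

-- a 0/1 indicator summed over a Nodup list, supported at the single member r0
lemma sum_pair_indicator (x : Int) (f : Int → Int) :
    ∀ (L : List Int), L.Nodup → ∀ (r0 : Int), r0 ∈ L →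
    (L.map (fun r => if ((r0, x) : Int × Int) = (r, f r) then (1 : Int) else 0)).sum
      = if x = f r0 then 1 else 0 := by
  intro L
  induction L with
  | nil => intro _ r0 h; simp at h
  | cons a l ih =>
      intro hnd r0 hmem
      simp only [List.map_cons, List.sum_cons]
      rcases List.mem_cons.mp hmem with h | h
      · subst h
        have hz : (l.map (fun r => if ((r0, x) : Int × Int) = (r, f r) then (1 : Int) else 0)).sum = 0 := by
          apply List.sum_eq_zero
          intro y hy
          rcases List.mem_map.mp hy with ⟨r, hr, hry⟩
          have : r0 ≠ r := fun he => (List.nodup_cons.mp hnd).1 (he ▸ hr)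
          simp [Prod.ext_iff, this] at hry
          omega
        rw [hz]
        by_cases hx : x = f r0 <;> simp [hx]
      · have hne : r0 ≠ a := by
          intro he; subst he; exact (List.nodup_cons.mp hnd).1 h
        rw [ih (List.nodup_cons.mp hnd).2 r0 h]
        simp [Prod.ext_iff, hne]

-- sum of a pointwise sum splits
lemma sum_map_add_split (M : List Int) (f g : Int → Int) :
    (M.map (fun r => f r + g r)).sum = (M.map f).sum + (M.map g).sum := by
  induction M with
  | nil => simp
  | cons a l ih => simp only [List.map_cons, List.sum_cons, ih]; ring

-- the histogram read-off at pattern `pat` equals A's direct score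
lemma hist_eq_aScore (pat : List Int) (L : Nat) (hL : pat.length = L)
    (hdvd : L ∣ 40) :
    ∀ (ans : List Int) (n : Nat),
    ((PySem.List.pyRange 0 40 1).map (fun r =>
        ((((PySem.List.enumerate ans (n : Int)).map
            (fun p => (PySem.Int.mod p.1 40, p.2))).count
          (r, PySem.List.pyGetD pat (PySem.Int.mod r (pat.length : Int)) 0) : Nat) : Int))).sum
      = aScore pat ans n := by
  intro ans
  induction ans with
  | nil =>
      intro n
      simp [PySem.List.enumerate_nil, aScore, List.sum_eq_zero]
  | cons x xs ih =>
      intro n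
      rw [PySem.List.enumerate_cons]
      simp only [List.map_cons, List.count_cons, beq_iff_eq]
      push_cast
      rw [sum_map_add_split]
      have hmodnat : PySem.Int.mod (n : Int) 40 = ((n % 40 : Nat) : Int) := by
        exact_mod_cast PySem.Int.mod_natCast n 40
      have hmem : ((n % 40 : Nat) : Int) ∈ PySem.List.pyRange 0 40 1 := by
        rw [PySem.List.mem_pyRange_one]
        constructor
        · positivity
        · exact_mod_cast Nat.mod_lt n (by norm_num)
      have hind := sum_pair_indicator x
        (fun r => PySem.List.pyGetD pat (PySem.Int.mod r (pat.length : Int)) 0)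
        (PySem.List.pyRange 0 40 1) (PySem.List.nodup_pyRange_one 0 40)
        ((n % 40 : Nat) : Int) hmem
      have hmod2 : PySem.Int.mod ((n % 40 : Nat) : Int) (pat.length : Int)
          = ((n % L : Nat) : Int) := by
        have h1 := PySem.Int.mod_natCast (n % 40) pat.length
        rw [hL] at h1 ⊢
        rw [h1]
        congr 1
        exact Nat.mod_mod_of_dvd n hdvd
      have hget : PySem.List.pyGetD pat (((n % L : Nat) : Int)) 0
          = pat.getD (n % L) 0 := PySem.List.pyGetD_natCast pat (n % L) 0
      have hcast : ((n : Int) + 1) = ((n + 1 : Nat) : Int) := by push_cast; ring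
      rw [hmodnat, hind]
      simp only [hmod2, hget]
      rw [hcast, ih (n + 1), aScore, hL]
      ring

-- a counting-insert loop keyed through `key` reads back as a count
lemma getD_foldl_insert_key {κ β : Type} [DecidableEq κ] [BEq κ] [LawfulBEq κ] (key : β → κ) :
    ∀ (l : List β) (d : PySem.Dict κ Int) (v : κ),
    (l.foldl (fun d p => d.insert (key p) (d.getD (key p) 0 + 1)) d).getD v 0
      = d.getD v 0 + ((l.map key).count v : Int) := by
  intro l
  induction l with
  | nil => intro d v; simp
  | cons a l ih =>
      intro d v
      simp only [List.foldl_cons, List.map_cons, List.count_cons, beq_iff_eq]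
      rw [ih, PySem.Dict.getD_insert]
      by_cases h : v = key a
      · simp [h]
        ring
      · simp [h]
        exact fun he => h he.symm

-- the dict built by B's loop reads back as a count over the keyed list
lemma cnt_getD (answers : List Int) (k : Int × Int) :
    (((PySem.List.enumerate answers).foldl
        (fun d p =>
          d.insert (PySem.Int.mod p.1 40, p.2) (d.getD (PySem.Int.mod p.1 40, p.2) 0 + 1))
        PySem.Dict.empty).getD k 0)
      = (((PySem.List.enumerate answers).map
          (fun p => (PySem.Int.mod p.1 40, p.2))).count k : Int) := by
  rw [getD_foldl_insert_key (fun p : Int × Int => (PySem.Int.mod p.1 40, p.2))]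
  simp [PySem.Dict.getD_empty]

-- ===== VERDICT (by name: the statement is the Claim_ definition above) =====
theorem solution_spec : Claim_equal_solution := by
  intro answers _
  unfold Spec_solution solution solution_alt
  rw [solLoopA_eq_aScore]
  simp only [List.map_cons, List.map_nil, zero_add, cnt_getD]
  have h5 := hist_eq_aScore [1,2,3,4,5] 5 rfl (by norm_num) answers 0
  have h8 := hist_eq_aScore [2,1,2,3,2,4,2,5] 8 rfl (by norm_num) answers 0
  have h10 := hist_eq_aScore [3,3,1,1,2,2,4,4,5,5] 10 rfl (by norm_num) answers 0
  simp only [Nat.cast_zero] at h5 h8 h10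
  simp only [h5, h8, h10]
  simp [PySem.List.enumerate, List.foldl, List.filterMap]
  split_ifs <;> simp
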